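-- pv_equiv track=rewrite | github.com/VenkatSubramaniam/misc_projects | pan_scrape/captcha_the_line.py | make_x_dict
-- ===== SOURCE A (Python) =====
-- def make_x_dict(black_array):
--     x_dict = dict()
--     for pix in black_array:
--         if pix[0] not in x_dict:
--             x_dict[pix[0]] = [pix[1]]
--         else:
--             x_dict[pix[0]].append(pix[1])
--     for x in x_dict:
--         x_dict[x] = (min(x_dict[x]), max(x_dict[x]))
--     return x_dict
-- ===== SOURCE B (Python) =====
-- def make_x_dict(black_array):
--     x_dict = {}
--     for pix in black_array:
--         x, y = pix[0], pix[1]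
--         cur = x_dict.get(x)
--         if cur is None:
--             x_dict[x] = (y, y)
--         else:
--             lo, hi = cur
--             x_dict[x] = (lo if lo <= y else y, hi if hi >= y else y)
--     return x_dict
-- ===== Notes on version B (the rewrite author's own statement) =====
-- stated objective: alternative
-- what changed: single pass maintaining running (min,max) tuples per key instead of grouping y-values into lists and reducing each with min/max in a second pass
import Mathlib
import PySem

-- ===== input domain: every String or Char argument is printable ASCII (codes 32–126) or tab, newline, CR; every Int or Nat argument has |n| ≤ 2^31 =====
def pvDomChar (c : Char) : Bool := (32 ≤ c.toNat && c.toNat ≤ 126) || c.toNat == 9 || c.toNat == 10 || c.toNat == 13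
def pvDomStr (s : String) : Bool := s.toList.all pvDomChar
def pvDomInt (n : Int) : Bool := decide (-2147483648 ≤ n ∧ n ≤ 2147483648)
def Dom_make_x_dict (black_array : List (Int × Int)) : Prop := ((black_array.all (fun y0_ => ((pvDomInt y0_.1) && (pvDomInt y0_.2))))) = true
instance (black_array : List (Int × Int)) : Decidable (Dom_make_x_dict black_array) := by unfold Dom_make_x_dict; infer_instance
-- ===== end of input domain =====

-- B replaces A's two passes (group y's into per-x lists, then min/max each list) by one pass
-- keeping a running (min, max) pair per x; alternative decomposition, same asymptotic cost.

-- ===== PORT A =====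
-- Python's second loop reassigns each key's value in place; since the value TYPE changes
-- (list → pair), the port rebuilds the dict over the same key order, which yields the same items.
def make_x_dict (black_array : List (Int × Int)) : List (Int × Int × Int) :=
  let x_dict : PySem.Dict Int (List Int) :=
    black_array.foldl (fun d pix =>
      if d.contains pix.1 = false then d.insert pix.1 [pix.2]
      else d.insert pix.1 (d.getD pix.1 [] ++ [pix.2])) PySem.Dict.empty
  (x_dict.keys.foldl (fun d x =>
      d.insert x ((PySem.List.min? (x_dict.getD x []) (fun y => y)).getD 0,
                  (PySem.List.max? (x_dict.getD x []) (fun y => y)).getD 0))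
    (PySem.Dict.empty : PySem.Dict Int (Int × Int))).items

-- ===== PORT B =====
def make_x_dict_alt (black_array : List (Int × Int)) : List (Int × Int × Int) :=
  (black_array.foldl (fun d pix =>
    match d.get? pix.1 with
    | none => d.insert pix.1 (pix.2, pix.2)
    | some (lo, hi) =>
        d.insert pix.1 ((if lo ≤ pix.2 then lo else pix.2),
                        (if hi ≥ pix.2 then hi else pix.2)))
    (PySem.Dict.empty : PySem.Dict Int (Int × Int))).items

-- ===== PRECONDITION & SPEC =====
def Spec_make_x_dict (black_array : List (Int × Int)) (out : List (Int × Int × Int)) : Prop := out = make_x_dict_alt black_array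
instance (black_array : List (Int × Int)) (out : List (Int × Int × Int)) : Decidable (Spec_make_x_dict black_array out) := by unfold Spec_make_x_dict; infer_instance

-- ===== CLAIM (what is proved, stated in full; the proofs are below) =====
def Claim_equal_make_x_dict : Prop := ∀ (black_array : List (Int × Int)), Dom_make_x_dict black_array → Spec_make_x_dict black_array (make_x_dict black_array)

-- ===== LEMMAS AND PROOFS =====

-- Relation between A's per-key list and B's per-key running (min, max) pair.
def pvRel (o1 : Option (List Int)) (o2 : Option (Int × Int)) : Prop :=
  (o1 = none ∧ o2 = none) ∨
  ∃ a t, o1 = some (a :: t) ∧ o2 = some (t.foldl min a, t.foldl max a)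

lemma pv_loop_inv (l : List (Int × Int)) (dA : PySem.Dict Int (List Int))
    (dB : PySem.Dict Int (Int × Int))
    (hk : dA.keys = dB.keys) (hnd : dA.keys.Nodup)
    (h : ∀ k, pvRel (dA.get? k) (dB.get? k)) :
    (l.foldl (fun d pix =>
      if d.contains pix.1 = false then d.insert pix.1 [pix.2]
      else d.insert pix.1 (d.getD pix.1 [] ++ [pix.2])) dA).keys
      = (l.foldl (fun d pix =>
          match d.get? pix.1 with
          | none => d.insert pix.1 (pix.2, pix.2)
          | some (lo, hi) =>
              d.insert pix.1 ((if lo ≤ pix.2 then lo else pix.2),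
                              (if hi ≥ pix.2 then hi else pix.2))) dB).keys
    ∧ (l.foldl (fun d pix =>
        if d.contains pix.1 = false then d.insert pix.1 [pix.2]
        else d.insert pix.1 (d.getD pix.1 [] ++ [pix.2])) dA).keys.Nodup
    ∧ ∀ k, pvRel
        ((l.foldl (fun d pix =>
          if d.contains pix.1 = false then d.insert pix.1 [pix.2]
          else d.insert pix.1 (d.getD pix.1 [] ++ [pix.2])) dA).get? k)
        ((l.foldl (fun d pix =>
          match d.get? pix.1 with
          | none => d.insert pix.1 (pix.2, pix.2)
          | some (lo, hi) =>
              d.insert pix.1 ((if lo ≤ pix.2 then lo else pix.2),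
                              (if hi ≥ pix.2 then hi else pix.2))) dB).get? k) := by
  induction l generalizing dA dB with
  | nil => exact ⟨hk, hnd, h⟩
  | cons pix rest ih =>
    obtain ⟨x, y⟩ := pix
    simp only [List.foldl_cons]
    have hcB : dB.contains x = dA.contains x := by
      rw [PySem.Dict.contains_eq_decide_mem_keys, PySem.Dict.contains_eq_decide_mem_keys, hk]
    by_cases hc : dA.contains x = false
    · -- fresh key: both insert the singleton summary
      have hgB : dB.get? x = none := by
        rw [PySem.Dict.get?_eq_none_iff_contains, hcB]; exact hc
      have hxmem : x ∉ dA.keys := fun hx => by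
        have := (PySem.Dict.contains_iff_mem_keys dA x).mpr hx
        rw [hc] at this; exact Bool.false_ne_true this
      rw [if_pos hc]
      simp only [hgB]
      apply ih
      · rw [PySem.Dict.keys_insert_of_not_contains dA _ hc,
            PySem.Dict.keys_insert_of_not_contains dB _ (by rw [hcB]; exact hc), hk]
      · rw [PySem.Dict.keys_insert_of_not_contains dA _ hc]
        refine hnd.append (List.nodup_singleton x) ?_
        intro a ha hax
        rw [List.mem_singleton] at hax
        subst hax
        exact hxmem ha
      · intro k
        rw [PySem.Dict.get?_insert, PySem.Dict.get?_insert]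
        by_cases hkx : k = x
        · subst hkx
          rw [if_pos rfl, if_pos rfl]
          exact Or.inr ⟨y, [], rfl, rfl⟩
        · rw [if_neg hkx, if_neg hkx]; exact h k
    · -- existing key: A appends y to the list, B updates the running (min, max)
      rw [Bool.not_eq_false] at hc
      have hgA : ∃ ys, dA.get? x = some ys := by
        have := PySem.Dict.contains_eq_isSome_get? dA x
        rw [hc] at this
        exact Option.isSome_iff_exists.mp this.symm
      obtain ⟨ys, hys⟩ := hgA
      rcases h x with ⟨h1, _⟩ | ⟨a, t, h1, h2⟩
      · rw [hys] at h1; exact absurd h1 (by simp)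
      rw [hys] at h1
      obtain rfl : ys = a :: t := by injection h1
      rw [if_neg (by simp [hc])]
      simp only [h2, PySem.Dict.getD_eq_get?_getD, hys, Option.getD_some]
      apply ih
      · rw [PySem.Dict.keys_insert_of_contains dA _ hc,
            PySem.Dict.keys_insert_of_contains dB _ (by rw [hcB]; exact hc), hk]
      · rw [PySem.Dict.keys_insert_of_contains dA _ hc]; exact hnd
      · intro k
        rw [PySem.Dict.get?_insert, PySem.Dict.get?_insert]
        by_cases hkx : k = x
        · subst hkx
          rw [if_pos rfl, if_pos rfl]
          refine Or.inr ⟨a, t ++ [y], by simp, ?_⟩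
          have hmin : (t ++ [y]).foldl min a = if t.foldl min a ≤ y then t.foldl min a else y := by
            rw [List.foldl_append]; simp [min_def]
          have hmax : (t ++ [y]).foldl max a = if t.foldl max a ≥ y then t.foldl max a else y := by
            rw [List.foldl_append]
            simp only [List.foldl_cons, List.foldl_nil, max_def, ge_iff_le]
            split_ifs with h1 h2 <;> omega
          rw [hmin, hmax]
        · rw [if_neg hkx, if_neg hkx]; exact h k

-- ===== VERDICT (by name: the statement is the Claim_ definition above) =====
theorem make_x_dict_spec : Claim_equal_make_x_dict := by
  intro black_array _
  unfold Spec_make_x_dict make_x_dict make_x_dict_alt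
  obtain ⟨hk, hnd, h⟩ := pv_loop_inv black_array PySem.Dict.empty PySem.Dict.empty
    (by rw [PySem.Dict.keys_empty, PySem.Dict.keys_empty])
    (by rw [PySem.Dict.keys_empty]; exact List.nodup_nil)
    (fun k => Or.inl ⟨PySem.Dict.get?_empty k, PySem.Dict.get?_empty k⟩)
  set dA := black_array.foldl (fun d pix =>
      if d.contains pix.1 = false then d.insert pix.1 [pix.2]
      else d.insert pix.1 (d.getD pix.1 [] ++ [pix.2])) PySem.Dict.empty with hdA
  set dB := black_array.foldl (fun d pix =>
      match d.get? pix.1 with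
      | none => d.insert pix.1 (pix.2, pix.2)
      | some (lo, hi) =>
          d.insert pix.1 ((if lo ≤ pix.2 then lo else pix.2),
                          (if hi ≥ pix.2 then hi else pix.2))) PySem.Dict.empty with hdB
  have hfresh : ∀ a ∈ dA.keys, (PySem.Dict.empty : PySem.Dict Int (Int × Int)).contains a = false :=
    fun a _ => PySem.Dict.contains_empty a
  have hitems := PySem.Dict.items_foldl_insert_fresh dA.keys
    (fun a => a)
    (fun x => ((PySem.List.min? (dA.getD x []) (fun y => y)).getD 0,
               (PySem.List.max? (dA.getD x []) (fun y => y)).getD 0))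
    PySem.Dict.empty hfresh (by simpa using hnd)
  rw [hitems]
  have hempty : (PySem.Dict.empty : PySem.Dict Int (Int × Int)).items = [] := rfl
  rw [hempty, List.nil_append,
      PySem.Dict.items_eq_map_keys dB (hk ▸ hnd) (0, 0), ← hk]
  apply List.map_congr_left
  intro x hx
  have hcA : dA.contains x = true := (PySem.Dict.contains_iff_mem_keys dA x).mpr hx
  have hgA : ∃ ys, dA.get? x = some ys := by
    have := PySem.Dict.contains_eq_isSome_get? dA x
    rw [hcA] at this
    exact Option.isSome_iff_exists.mp this.symm
  obtain ⟨ys, hys⟩ := hgA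
  rcases h x with ⟨h1, _⟩ | ⟨a, t, h1, h2⟩
  · rw [hys] at h1; exact absurd h1 (by simp)
  rw [hys] at h1
  obtain rfl : ys = a :: t := by injection h1
  simp [PySem.Dict.getD_eq_get?_getD, hys, h2,
        PySem.List.min?_id_cons, PySem.List.max?_id_cons]
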